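-- pv_equiv track=rewrite | github.com/mmrp/programs | codewars/python/check_square4.py | trim_permutation
-- ===== SOURCE A (Python) =====
-- def trim_permutation(perm, entry):
--     res = []
--     for v in perm:
--         for p in zip(entry, v):
--             if p[0] and p[0] != p[1]:
--                 break
--         else:
--             res.append(v)
--     return res
-- ===== SOURCE B (Python) =====
-- def trim_permutation(perm, entry):
--     survivors = list(perm)
--     limit = max(map(len, perm), default=0)
--     for i, e in enumerate(entry[:limit]):
--         if e:
--             survivors = [v for v in survivors if i >= len(v) or v[i] == e]
--     return survivors
-- ===== Notes on version B (the rewrite author's own statement) =====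
-- stated objective: alternative
-- what changed: Inverts the loop structure: instead of scanning entry per candidate (for/else with break), B iterates over entry's positions up to the longest candidate's length and narrows the whole survivor set one constraint at a time by repeated filtering; the 'i >= len(v)' guard and the entry[:limit] cap reproduce zip's truncation.
import Mathlib
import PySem

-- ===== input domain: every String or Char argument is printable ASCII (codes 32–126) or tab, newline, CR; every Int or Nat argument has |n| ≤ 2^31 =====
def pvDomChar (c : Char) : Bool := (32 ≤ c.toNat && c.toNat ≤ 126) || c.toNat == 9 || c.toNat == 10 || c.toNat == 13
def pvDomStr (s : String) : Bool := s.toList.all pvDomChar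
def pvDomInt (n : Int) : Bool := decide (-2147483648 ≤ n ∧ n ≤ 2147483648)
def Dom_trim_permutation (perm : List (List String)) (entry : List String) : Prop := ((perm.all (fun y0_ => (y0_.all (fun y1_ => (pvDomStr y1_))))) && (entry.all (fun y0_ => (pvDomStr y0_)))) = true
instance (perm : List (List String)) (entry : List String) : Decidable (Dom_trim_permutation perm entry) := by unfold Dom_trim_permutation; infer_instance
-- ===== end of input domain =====

-- B inverts the loop structure: it iterates over entry's positions and narrows the whole
-- survivor set one constraint at a time, instead of A's per-candidate scan of entry.

-- ===== PORT A =====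
-- inner 'for p in zip(entry, v): … break / else: append' loop, as a Bool: true = no break
def pvAKeep : List (String × String) → Bool
  | [] => true
  | p :: rest => if p.1 != "" && p.1 != p.2 then false else pvAKeep rest

def trim_permutation (perm : List (List String)) (entry : List String) : List (List String) :=
  perm.foldl (fun res v => if pvAKeep (entry.zip v) then res ++ [v] else res) []

-- ===== PORT B =====
-- 'limit = max(map(len, perm), default=0)' (fold max of the lengths, exact since lengths ≥ 0);
-- 'for i, e in enumerate(entry[:limit]): if e: survivors = [v for v in survivors if i >= len(v) or v[i] == e]'
-- entry[:limit] with limit ≥ 0 is List.take limit (exact here since limit is a Nat)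
def trim_permutation_alt (perm : List (List String)) (entry : List String) : List (List String) :=
  (PySem.List.enumerate (entry.take (perm.foldl (fun m v => max m v.length) 0)) 0).foldl
    (fun survivors p =>
      if p.2 != "" then
        survivors.filter (fun v =>
          decide ((v.length : Int) ≤ p.1) || (PySem.List.pyGetD v p.1 "" == p.2))
      else survivors)
    perm

-- ===== PRECONDITION & SPEC =====
def Spec_trim_permutation (perm : List (List String)) (entry : List String) (out : List (List String)) : Prop := out = trim_permutation_alt perm entry
instance (perm : List (List String)) (entry : List String) (out : List (List String)) : Decidable (Spec_trim_permutation perm entry out) := by unfold Spec_trim_permutation; infer_instance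

-- ===== CLAIM (what is proved, stated in full; the proofs are below) =====
def Claim_equal_trim_permutation : Prop := ∀ (perm : List (List String)) (entry : List String), Dom_trim_permutation perm entry → Spec_trim_permutation perm entry (trim_permutation perm entry)

-- ===== LEMMAS AND PROOFS =====

-- B's staged narrowing = one filter by the conjunction of all stage predicates
lemma pv_foldl_filter_all {α β : Type} (ps : List β) (c : β → Bool) (f : β → α → Bool)
    (l : List α) :
    ps.foldl (fun s p => if c p then s.filter (f p) else s) l
      = l.filter (fun v => ps.all (fun p => !c p || f p v)) := by
  induction ps generalizing l with
  | nil => simp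
  | cons p ps ih =>
    simp only [List.foldl_cons, List.all_cons]
    by_cases h : c p = true
    · rw [if_pos h, ih, List.filter_filter]
      apply List.filter_congr
      intro v _
      simp [h, Bool.and_comm]
    · rw [if_neg h, ih]
      apply List.filter_congr
      intro v _
      have hc : c p = false := by simpa using h
      simp [hc]

lemma pv_all_filter_or {β : Type} (l : List β) (c q : β → Bool) :
    (l.filter c).all q = l.all (fun p => !c p || q p) := by
  induction l with
  | nil => simp
  | cons x xs ih =>
    by_cases h : c x = true <;> simp [h, ih]

-- every constraint index from position k on has its guard false once v.length ≤ k
lemma pv_all_big (es : List String) (v : List String) (k : Nat) (h : v.length ≤ k) :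
    (((PySem.List.enumerate es (k : Int)).filter (fun p => p.2 != "")).all (fun p =>
      if p.1 < (v.length : Int) then PySem.List.pyGetD v p.1 "" == p.2 else true)) = true := by
  rw [List.all_eq_true]
  intro p hp
  have hp' := List.mem_of_mem_filter hp
  rw [PySem.List.mem_enumerate_iff] at hp'
  obtain ⟨j, hj, rfl⟩ := hp'
  have : ¬ ((k : Int) + j < (v.length : Int)) := by omega
  simp [this]

-- the per-candidate checks of A and the filtered if-form coincide (general start offset k)
lemma pv_keep_eq (entry : List String) (v : List String) (k : Nat) :
    pvAKeep (entry.zip (v.drop k)) =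
    (((PySem.List.enumerate entry (k : Int)).filter (fun p => p.2 != "")).all (fun p =>
      if p.1 < (v.length : Int) then PySem.List.pyGetD v p.1 "" == p.2 else true)) := by
  induction entry generalizing k with
  | nil => simp [PySem.List.enumerate_nil, pvAKeep]
  | cons e es ih =>
    by_cases hk : k < v.length
    · have hdrop : v.drop k = v[k] :: v.drop (k + 1) := List.drop_eq_getElem_cons hk
      have hget : PySem.List.pyGetD v (k : Int) "" = v[k] := by
        rw [PySem.List.pyGetD_natCast]
        simp [List.getD, hk]
      have hlt : ((k : Int) < (v.length : Int)) := by exact_mod_cast hk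
      have hcast : ((k : Int) + 1) = (((k + 1 : Nat)) : Int) := by omega
      rw [hdrop, List.zip_cons_cons, PySem.List.enumerate_cons, hcast, List.filter_cons]
      by_cases he : e = ""
      · subst he
        have h1 : pvAKeep (("", v[k]) :: es.zip (v.drop (k + 1))) =
            pvAKeep (es.zip (v.drop (k + 1))) := by
          simp only [pvAKeep, bne_self_eq_false, Bool.false_and, Bool.false_eq_true, if_false]
        rw [h1, ih (k + 1)]
        simp only [bne_self_eq_false, Bool.false_eq_true, if_false]
      · have he' : (e != "") = true := by simp [he]
        have h2 : pvAKeep ((e, v[k]) :: es.zip (v.drop (k + 1))) =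
            (if (e != v[k]) = true then false else pvAKeep (es.zip (v.drop (k + 1)))) := by
          simp only [pvAKeep, he', Bool.true_and]
        rw [h2, ih (k + 1)]
        simp only [he', if_true, List.all_cons, if_pos hlt, hget]
        by_cases hev : e = v[k]
        · subst hev
          simp
        · have hb1 : (e != v[k]) = true := by simp [hev]
          have hb2 : (v[k] == e) = false := by
            simp [beq_eq_false_iff_ne]
            exact fun h => hev h.symm
          simp [hb1, hb2]
    · have hdrop : v.drop k = [] := List.drop_eq_nil_of_le (by omega)
      rw [hdrop, List.zip_nil_right]
      simp only [pvAKeep]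
      exact (pv_all_big (e :: es) v k (by omega)).symm

-- the initial accumulator is a lower bound of the running max
lemma pv_init_le_foldl_max (l : List (List String)) (a : Nat) :
    a ≤ l.foldl (fun m w => max m w.length) a := by
  induction l generalizing a with
  | nil => exact le_refl a
  | cons w ws ih => exact le_trans (le_max_left a w.length) (ih (max a w.length))

-- every member's length is bounded by the fold-max
lemma pv_len_le_foldl_max {l : List (List String)} {v : List String} (hv : v ∈ l) (a : Nat) :
    v.length ≤ l.foldl (fun m w => max m w.length) a := by
  induction l generalizing a with
  | nil => cases hv
  | cons w ws ih =>
    rcases List.mem_cons.mp hv with h | h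
    · subst h
      exact le_trans (le_max_right a v.length) (pv_init_le_foldl_max ws _)
    · exact ih h _

-- zip truncates at the shorter list, so taking at least v.length of xs changes nothing
lemma pv_zip_take {α β : Type} (xs : List α) (v : List β) (L : Nat) (h : v.length ≤ L) :
    (xs.take L).zip v = xs.zip v := by
  induction xs generalizing v L with
  | nil => simp
  | cons x xs ih =>
    cases v with
    | nil => simp
    | cons b bs =>
      cases L with
      | zero => simp at h
      | succ L => simp [List.take_succ_cons, ih bs L (by simpa using h)]

-- bridge: B's per-stage predicate in or-form equals the if-form used above
lemma pv_or_eq_if (v : List String) (p : Int × String) :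
    (decide ((v.length : Int) ≤ p.1) || (PySem.List.pyGetD v p.1 "" == p.2)) =
    (if p.1 < (v.length : Int) then PySem.List.pyGetD v p.1 "" == p.2 else true) := by
  by_cases h : p.1 < (v.length : Int)
  · have : ¬ ((v.length : Int) ≤ p.1) := by omega
    simp [h, this]
  · have : ((v.length : Int) ≤ p.1) := by omega
    simp [h, this]

-- ===== VERDICT (by name: the statement is the Claim_ definition above) =====
theorem trim_permutation_spec : Claim_equal_trim_permutation := by
  intro perm entry _
  unfold Spec_trim_permutation trim_permutation trim_permutation_alt
  rw [PySem.List.foldl_append_if_eq_filter, pv_foldl_filter_all]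
  simp only [List.nil_append]
  apply List.filter_congr
  intro v hv
  rw [← pv_all_filter_or]
  have hL : v.length ≤ perm.foldl (fun m w => max m w.length) 0 := pv_len_le_foldl_max hv 0
  rw [← pv_zip_take entry v _ hL]
  have h1 := pv_keep_eq (entry.take (perm.foldl (fun m w => max m w.length) 0)) v 0
  simp only [List.drop_zero, Nat.cast_zero] at h1
  rw [h1]
  have hf : (fun p : Int × String =>
      (decide ((v.length : Int) ≤ p.1) || (PySem.List.pyGetD v p.1 "" == p.2))) =
      (fun p => if p.1 < (v.length : Int) then PySem.List.pyGetD v p.1 "" == p.2 else true) :=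
    funext (pv_or_eq_if v)
  rw [hf]
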